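-- pv_equiv track=rewrite | github.com/artisan1218/LeetCode-Solution | minNumOfIncrement/minNumOfIncrement.py | minNumberOperationsBruteForce
-- ===== SOURCE A (Python) =====
-- from typing import List
--
-- def minNumberOperationsBruteForce(target: List[int]) -> int:
--     def countBlocks(nums, level):
--         blocks = 0
--         for i, num in enumerate(nums):
--             if i==0 and num-level>0:
--                 blocks = 1
--             elif num-level > 0 and nums[i-1]-level <= 0:
--                 blocks += 1
--         return blocks
--
--     height = max(target)
--     level = 0
--     minNum = 0
--     for i in range(height):
--         minNum += countBlocks(target, level)
--         level+=1
--
--     return minNum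
-- ===== SOURCE B (Python) =====
-- from typing import List
--
-- def minNumberOperationsBruteForce(target: List[int]) -> int:
--     total = 0
--     prev = 0
--     for t in target:
--         if t > prev:
--             total += t - prev
--         prev = t if t > 0 else 0
--     return total
-- ===== Notes on version B (the rewrite author's own statement) =====
-- stated objective: faster
-- what changed: Replaced the level-by-level block-counting loop (one full scan of the array per unit of height) by a single left-to-right pass that adds each positive rise over the (zero-clamped) previous element.
import Mathlib
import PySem

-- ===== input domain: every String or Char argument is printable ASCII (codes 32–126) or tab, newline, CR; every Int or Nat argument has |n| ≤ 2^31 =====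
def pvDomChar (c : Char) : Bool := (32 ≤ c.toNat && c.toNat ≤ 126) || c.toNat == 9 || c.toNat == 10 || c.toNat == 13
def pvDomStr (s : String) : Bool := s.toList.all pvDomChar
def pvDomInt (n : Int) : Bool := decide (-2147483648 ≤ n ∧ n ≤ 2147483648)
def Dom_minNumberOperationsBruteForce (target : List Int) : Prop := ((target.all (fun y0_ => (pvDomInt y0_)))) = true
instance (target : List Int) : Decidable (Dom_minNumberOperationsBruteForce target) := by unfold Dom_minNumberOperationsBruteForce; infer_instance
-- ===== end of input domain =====

-- B replaces A's level-by-level block counting (one scan per unit of height) by a single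
-- left-to-right pass summing positive rises over the zero-clamped previous element (faster).


-- ===== PORT A =====
def countBlocks (nums : List Int) (level : Int) : Int :=
  (PySem.List.enumerate nums 0).foldl
    (fun blocks p =>
      if p.1 = 0 ∧ p.2 - level > 0 then 1
      else if p.2 - level > 0 ∧ (PySem.List.pyGet? nums (p.1 - 1)).getD 0 - level ≤ 0 then
        blocks + 1
      else blocks)
    0

def minNumberOperationsBruteForce (target : List Int) : Int :=
  let height := (PySem.List.max? target (fun y => y)).getD 0
  ((PySem.List.pyRange 0 height 1).foldl
      (fun st _ => (st.1 + 1, st.2 + countBlocks target st.1)) ((0 : Int), (0 : Int))).2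

-- ===== PORT B =====
def minNumberOperationsBruteForce_alt (target : List Int) : Int :=
  (target.foldl
      (fun st t =>
        ((if t > 0 then t else 0), if t > st.1 then st.2 + (t - st.1) else st.2))
      ((0 : Int), (0 : Int))).2

-- ===== PRECONDITION & SPEC =====
-- Pre_ excludes only the empty list, on which Python's max(target) raises ValueError.
def Pre_minNumberOperationsBruteForce (target : List Int) : Prop := target ≠ []
instance (target : List Int) : Decidable (Pre_minNumberOperationsBruteForce target) := by
  unfold Pre_minNumberOperationsBruteForce; infer_instance

def pvWitness_minNumberOperationsBruteForce : List Int := [1, 2, 1]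

def Spec_minNumberOperationsBruteForce (target : List Int) (out : Int) : Prop :=
  out = minNumberOperationsBruteForce_alt target
instance (target : List Int) (out : Int) : Decidable (Spec_minNumberOperationsBruteForce target out) := by
  unfold Spec_minNumberOperationsBruteForce; infer_instance

-- ===== CLAIM (what is proved, stated in full; the proofs are below) =====
def Claim_equal_minNumberOperationsBruteForce : Prop := ∀ (target : List Int), Dom_minNumberOperationsBruteForce target → Pre_minNumberOperationsBruteForce target → Spec_minNumberOperationsBruteForce target (minNumberOperationsBruteForce target)

-- ===== LEMMAS AND PROOFS =====

-- pairs (prev, cur): (0, t0), (t0, t1), …, (t_{n-2}, t_{n-1})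
def pvPairs (t : List Int) : List (Int × Int) := List.zip (0 :: t) t

-- number of blocks at level l, over the (prev, cur) pairs
def pvCnt (l : Int) : List (Int × Int) → Int
  | [] => 0
  | pc :: rest => (if l < pc.2 ∧ pc.1 ≤ l then 1 else 0) + pvCnt l rest

-- capped closed form: Σ max(0, min(cur, cap) - max(prev, 0))
def pvFcap (cap : Int) : List (Int × Int) → Int
  | [] => 0
  | pc :: rest => max 0 (min pc.2 cap - max pc.1 0) + pvFcap cap rest

-- uncapped closed form: Σ max(0, cur - max(prev, 0))
def pvF : List (Int × Int) → Int
  | [] => 0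
  | pc :: rest => max 0 (pc.2 - max pc.1 0) + pvF rest

-- Σ_{j<n} countBlocks t (lvl + j)
def pvSumLv (t : List Int) (lvl : Int) : Nat → Int
  | 0 => 0
  | n + 1 => countBlocks t lvl + pvSumLv t (lvl + 1) n

lemma pvA_outer (t : List Int) :
    ∀ (L : List Int) (lvl s : Int),
      (L.foldl (fun st _ => (st.1 + 1, st.2 + countBlocks t st.1)) (lvl, s)).2
        = s + pvSumLv t lvl L.length := by
  intro L
  induction L with
  | nil => intro lvl s; simp [pvSumLv]
  | cons x L ih =>
    intro lvl s
    simp only [List.foldl_cons, List.length_cons, pvSumLv, ih]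
    ring

lemma pvCb_suffix (t : List Int) (l : Int) :
    ∀ (u : List Int) (p : Int) (k : Nat) (b : Int),
      t.drop k = p :: u →
      ((PySem.List.enumerate u ((k : Int) + 1)).foldl
          (fun blocks q =>
            if q.1 = 0 ∧ q.2 - l > 0 then 1
            else if q.2 - l > 0 ∧ (PySem.List.pyGet? t (q.1 - 1)).getD 0 - l ≤ 0 then blocks + 1
            else blocks)
          b)
        = b + pvCnt l (List.zip (p :: u) u) := by
  intro u
  induction u with
  | nil => intro p k b _; simp [PySem.List.enumerate, pvCnt]
  | cons c u ih =>
    intro p k b hdrop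
    have htk : t[k]? = some p := by
      rw [← List.head?_drop, hdrop]; rfl
    have hget : PySem.List.pyGet? t (((k : Int) + 1) - 1) = some p := by
      simpa [PySem.List.pyGet?_natCast] using htk
    have hdrop' : t.drop (k + 1) = c :: u := by
      rw [← List.tail_drop, hdrop]; rfl
    rw [PySem.List.enumerate_cons]
    simp only [List.foldl_cons]
    have step :
        (if (k : Int) + 1 = 0 ∧ c - l > 0 then 1
         else if c - l > 0 ∧ (PySem.List.pyGet? t (((k : Int) + 1) - 1)).getD 0 - l ≤ 0 then b + 1
         else b)
          = b + (if l < c ∧ p ≤ l then 1 else 0) := by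
      rw [hget]
      have hk0 : ¬((k : Int) + 1 = 0) := by omega
      simp only [hk0, false_and, if_false, Option.getD_some]
      split_ifs <;> omega
    rw [step]
    have := ih c (k + 1) (b + (if l < c ∧ p ≤ l then 1 else 0)) hdrop'
    have hcast : ((k : Int) + 1) + 1 = ((k + 1 : Nat) : Int) + 1 := by push_cast; ring
    rw [hcast, this]
    simp [pvCnt, List.zip]
    ring

lemma pvCb_eq (t : List Int) (l : Int) (hl : 0 ≤ l) :
    countBlocks t l = pvCnt l (pvPairs t) := by
  cases t with
  | nil => simp [countBlocks, pvPairs, pvCnt, PySem.List.enumerate]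
  | cons x rest =>
    unfold countBlocks
    rw [PySem.List.enumerate_cons]
    simp only [List.foldl_cons]
    have hhead :
        (if True ∧ x - l > 0 then (1 : Int)
         else if x - l > 0 ∧ (PySem.List.pyGet? (x :: rest) ((0 : Int) - 1)).getD 0 - l ≤ 0 then 0 + 1
         else 0)
          = (if l < x ∧ (0 : Int) ≤ l then 1 else 0) := by
      split_ifs <;> simp_all
    rw [hhead]
    have hdrop : (x :: rest).drop 0 = x :: rest := rfl
    have := pvCb_suffix (x :: rest) l rest x 0 (if l < x ∧ (0 : Int) ≤ l then 1 else 0) hdrop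
    simp only [Nat.cast_zero] at this
    rw [this]
    simp [pvPairs, pvCnt, List.zip]

lemma pvFcap_succ (l : Int) (hl : 0 ≤ l) :
    ∀ ps : List (Int × Int), pvFcap (l + 1) ps = pvFcap l ps + pvCnt l ps := by
  intro ps
  induction ps with
  | nil => simp [pvFcap, pvCnt]
  | cons pc rest ih =>
    simp only [pvFcap, pvCnt, ih]
    have : max 0 (min pc.2 (l + 1) - max pc.1 0)
        = max 0 (min pc.2 l - max pc.1 0) + (if l < pc.2 ∧ pc.1 ≤ l then 1 else 0) := by
      split_ifs <;> omega
    omega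

lemma pvSumLv_eq (t : List Int) :
    ∀ (n : Nat) (lvl : Int), 0 ≤ lvl →
      pvSumLv t lvl n = pvFcap (lvl + n) (pvPairs t) - pvFcap lvl (pvPairs t) := by
  intro n
  induction n with
  | zero => intro lvl _; simp [pvSumLv]
  | succ n ih =>
    intro lvl hl
    have h1 := ih (lvl + 1) (by omega)
    have h2 := pvFcap_succ lvl hl (pvPairs t)
    have h3 : lvl + 1 + (n : Int) = lvl + ((n + 1 : Nat) : Int) := by push_cast; ring
    simp only [pvSumLv, pvCb_eq t lvl hl, h1, ← h3, h2]
    ring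

lemma pvFcap_zero : ∀ ps : List (Int × Int), pvFcap 0 ps = 0 := by
  intro ps
  induction ps with
  | nil => rfl
  | cons pc rest ih => simp only [pvFcap, ih]; omega

lemma pvFcap_eq_F (H : Int) :
    ∀ ps : List (Int × Int), (∀ pc ∈ ps, pc.2 ≤ H) →
      pvFcap (max H 0) ps = pvF ps := by
  intro ps
  induction ps with
  | nil => intro _; rfl
  | cons pc rest ih =>
    intro hb
    have h1 : pc.2 ≤ H := hb pc (List.mem_cons_self)
    have h2 := ih (fun q hq => hb q (List.mem_cons_of_mem _ hq))
    simp only [pvF, pvFcap, h2]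
    omega

lemma pvB_fold :
    ∀ (t : List Int) (p s : Int),
      (t.foldl
          (fun st x => ((if x > 0 then x else 0), if x > st.1 then st.2 + (x - st.1) else st.2))
          ((if 0 < p then p else 0), s)).2
        = s + pvF (List.zip (p :: t) t) := by
  intro t
  induction t with
  | nil => intro p s; simp [pvF]
  | cons c u ih =>
    intro p s
    simp only [List.foldl_cons]
    have step : (if c > (if 0 < p then p else 0) then s + (c - (if 0 < p then p else 0)) else s)
        = s + max 0 (c - max p 0) := by
      split_ifs <;> omega
    have hgt : (if c > 0 then c else 0) = (if 0 < c then c else 0) := by split_ifs <;> omega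
    rw [step, hgt, ih c (s + max 0 (c - max p 0))]
    simp [pvF, List.zip]
    ring

lemma pvB_eq (t : List Int) : minNumberOperationsBruteForce_alt t = pvF (pvPairs t) := by
  unfold minNumberOperationsBruteForce_alt
  have := pvB_fold t 0 0
  simpa [pvPairs] using this

-- ===== VERDICT (by name: the statement is the Claim_ definition above) =====
theorem minNumberOperationsBruteForce_spec : Claim_equal_minNumberOperationsBruteForce := by
  intro target _ hpre
  unfold Spec_minNumberOperationsBruteForce minNumberOperationsBruteForce
  obtain ⟨m, hm⟩ : ∃ m, PySem.List.max? target (fun y => y) = some m := by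
    cases h : PySem.List.max? target (fun y => y) with
    | none => exact absurd ((PySem.List.max?_eq_none_iff target (fun y => y)).mp h) hpre
    | some m => exact ⟨m, rfl⟩
  have hmax : ∀ y ∈ target, y ≤ m := by
    intro y hy
    simpa using PySem.List.max?_isMax hm y hy
  simp only [hm, Option.getD_some]
  rw [PySem.List.pyRange_one, pvA_outer target]
  simp only [List.length_map, List.length_range, zero_add]
  rw [pvSumLv_eq target (m - 0).toNat 0 le_rfl]
  have hcast : (0 : Int) + (((m - 0).toNat : Nat) : Int) = max m 0 := by
    omega
  rw [hcast, pvFcap_zero]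
  have hbound : ∀ pc ∈ pvPairs target, pc.2 ≤ m := by
    intro pc hpc
    exact hmax pc.2 (List.of_mem_zip hpc).2
  rw [pvFcap_eq_F m (pvPairs target) hbound, pvB_eq]
  ring
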